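-- pv_equiv track=rewrite | github.com/calvynddb/nexo-database | backend/services/filter_state_service.py | ensure_state
-- ===== SOURCE A (Python) =====
-- def ensure_state(state: dict | None, defaults: dict) -> dict:
--     merged = dict(state or {})
--
--     for key, default in defaults.items():
--         merged.setdefault(key, default)
--
--     for key in list(merged.keys()):
--         if key not in defaults:
--             merged.pop(key)
--
--     return merged
-- ===== SOURCE B (Python) =====
-- def ensure_state(state: dict | None, defaults: dict) -> dict:
--     remaining = dict(defaults)
--     out = []
--     for k, v in (state or {}).items():
--         if k in remaining:
--             out.append((k, v))
--             del remaining[k]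
--     return dict(out + list(remaining.items()))
-- ===== Notes on version B (the rewrite author's own statement) =====
-- stated objective: alternative
-- what changed: A builds the full merged dict with a setdefault pass over defaults and then prunes extra keys in a second scan over merged.keys(); B never builds that dict: one pass over the state items consumes a shrinking copy of defaults (deleting each matched key), collecting kept pairs in order, and the defaults still unconsumed are appended at the end.
import Mathlib
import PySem

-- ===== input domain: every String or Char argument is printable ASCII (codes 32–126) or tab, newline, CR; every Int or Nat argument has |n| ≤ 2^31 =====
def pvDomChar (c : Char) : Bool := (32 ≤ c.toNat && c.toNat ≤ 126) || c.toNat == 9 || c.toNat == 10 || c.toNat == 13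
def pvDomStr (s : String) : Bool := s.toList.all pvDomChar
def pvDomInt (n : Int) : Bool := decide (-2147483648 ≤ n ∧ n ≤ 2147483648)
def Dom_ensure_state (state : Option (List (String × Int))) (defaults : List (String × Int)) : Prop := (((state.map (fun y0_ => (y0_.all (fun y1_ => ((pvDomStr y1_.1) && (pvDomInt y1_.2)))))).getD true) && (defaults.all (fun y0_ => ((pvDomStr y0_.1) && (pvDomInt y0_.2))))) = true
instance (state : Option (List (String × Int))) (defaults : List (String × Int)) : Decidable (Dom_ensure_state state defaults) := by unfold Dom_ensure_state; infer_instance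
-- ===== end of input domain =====

-- B replaces A's build-merged-then-prune passes by one pass over state that consumes a shrinking copy of defaults; objective: alternative.


-- ===== PORT A =====
def ensure_state (state : Option (List (String × Int))) (defaults : List (String × Int)) : List (String × Int) :=
  let merged := PySem.Dict.ofList (state.getD [])                                   -- merged = dict(state or {})
  let merged := defaults.foldl (fun m kv => m.setdefault kv.1 kv.2) merged          -- for key, default in defaults.items(): merged.setdefault(key, default)
  let merged := merged.keys.foldl                                                   -- for key in list(merged.keys()):
    (fun m k => if decide (k ∈ defaults.map Prod.fst) then m else m.erase k)        --   if key not in defaults: merged.pop(key)  (pop with a present key = erase)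
    merged
  merged.items

-- ===== PORT B =====
-- loop body: if k in remaining: out.append((k, v)); del remaining[k]
def esStep (acc : List (String × Int) × PySem.Dict String Int) (kv : String × Int) :
    List (String × Int) × PySem.Dict String Int :=
  if acc.2.contains kv.1 then (acc.1 ++ [kv], acc.2.erase kv.1) else acc

def ensure_state_alt (state : Option (List (String × Int))) (defaults : List (String × Int)) : List (String × Int) :=
  let fin := (state.getD []).foldl esStep ([], PySem.Dict.ofList defaults)   -- remaining = dict(defaults); out = []; for k, v in (state or {}).items(): …
  (PySem.Dict.ofList (fin.1 ++ fin.2.items)).items                          -- return dict(out + list(remaining.items()))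

-- ===== PRECONDITION & SPEC =====
-- Pre_ only states the dict representation invariant: both arguments stand for Python dicts, whose keys are
-- always unique, so association lists with duplicate keys represent no Python input and are excluded.
def Pre_ensure_state (state : Option (List (String × Int))) (defaults : List (String × Int)) : Prop :=
  ((state.getD []).map Prod.fst).Nodup ∧ (defaults.map Prod.fst).Nodup
instance (state : Option (List (String × Int))) (defaults : List (String × Int)) : Decidable (Pre_ensure_state state defaults) := by unfold Pre_ensure_state; infer_instance
def pvWitness_ensure_state : (Option (List (String × Int))) × (List (String × Int)) :=
  (some [("a", 1), ("x", 5)], [("a", 0), ("b", 2)])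
def Spec_ensure_state (state : Option (List (String × Int))) (defaults : List (String × Int)) (out : List (String × Int)) : Prop := out = ensure_state_alt state defaults
instance (state : Option (List (String × Int))) (defaults : List (String × Int)) (out : List (String × Int)) : Decidable (Spec_ensure_state state defaults out) := by unfold Spec_ensure_state; infer_instance

-- ===== CLAIM (what is proved, stated in full; the proofs are below) =====
def Claim_equal_ensure_state : Prop := ∀ (state : Option (List (String × Int))) (defaults : List (String × Int)), Dom_ensure_state state defaults → Pre_ensure_state state defaults → Spec_ensure_state state defaults (ensure_state state defaults)

-- ===== LEMMAS AND PROOFS =====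

-- dict(l) keeps l's items verbatim when l has no duplicate keys
theorem pv_items_ofList {l : List (String × Int)} (h : (l.map Prod.fst).Nodup) :
    (PySem.Dict.ofList l).items = l := by
  have := PySem.Dict.items_foldl_insert_fresh l Prod.fst Prod.snd PySem.Dict.empty
    (fun a _ => PySem.Dict.contains_empty a.1) h
  simpa [PySem.Dict.ofList, PySem.Dict.update] using this

-- the setdefault loop appends exactly the entries whose key is not already present
theorem pv_setdefault_fold (ds : List (String × Int)) (m : PySem.Dict String Int)
    (h : (ds.map Prod.fst).Nodup) :
    (ds.foldl (fun m kv => m.setdefault kv.1 kv.2) m).items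
      = m.items ++ ds.filter (fun kv => !m.contains kv.1) := by
  induction ds generalizing m with
  | nil => simp
  | cons kv t ih =>
    simp only [List.map_cons, List.nodup_cons] at h
    by_cases hc : m.contains kv.1
    · simp only [List.foldl_cons, PySem.Dict.setdefault, hc, if_pos, List.filter_cons,
        Bool.not_true]
      exact ih m h.2
    · have hc' : m.contains kv.1 = false := by simpa using hc
      rw [List.foldl_cons]
      have hsd : m.setdefault kv.1 kv.2 = PySem.Dict.mk (m.items ++ [(kv.1, kv.2)]) := by
        simp [PySem.Dict.setdefault, hc']
      rw [hsd, ih _ h.2]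
      have hfil : t.filter (fun p => !(PySem.Dict.mk (m.items ++ [(kv.1, kv.2)])).contains p.1)
          = t.filter (fun p => !m.contains p.1) := by
        apply List.filter_congr
        intro p hp
        have hne : p.1 ≠ kv.1 := by
          intro he; exact h.1 (he ▸ List.mem_map_of_mem hp)
        have hb : (kv.1 == p.1) = false := beq_eq_false_iff_ne.mpr (Ne.symm hne)
        simp [PySem.Dict.contains, List.any_append, hb]
      rw [hfil]
      simp [hc']

-- the prune loop over a key list filters the items by (key ∈ dsk ∨ key untouched)
theorem pv_erase_fold (dsk : List String) (ks : List String) (m : PySem.Dict String Int) :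
    (ks.foldl (fun m k => if decide (k ∈ dsk) then m else m.erase k) m).items
      = m.items.filter (fun p => decide (p.1 ∈ dsk ∨ p.1 ∉ ks)) := by
  induction ks generalizing m with
  | nil => simp
  | cons k t ih =>
    by_cases hk : k ∈ dsk
    · simp only [List.foldl_cons, hk, decide_true, if_pos]
      rw [ih m]
      apply List.filter_congr
      intro p _
      by_cases hpk : p.1 = k
      · simp [hpk, hk]
      · simp [List.mem_cons, hpk]
    · simp only [List.foldl_cons, hk, decide_false, Bool.false_eq_true, if_neg,
        not_false_iff]
      rw [ih]
      simp only [PySem.Dict.erase, List.filter_filter]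
      apply List.filter_congr
      intro p _
      by_cases hpk : p.1 = k
      · simp [hpk, hk]
      · simp [List.mem_cons, hpk]

-- contains on a literal dict is key membership
theorem pv_contains_mk (l : List (String × Int)) (k : String) :
    (PySem.Dict.mk l).contains k = decide (k ∈ l.map Prod.fst) := by
  simpa [PySem.Dict.keys] using
    PySem.Dict.contains_eq_decide_mem_keys (PySem.Dict.mk l) k

-- characterization of B's loop: kept state entries appended to out, remaining shrunk to the unconsumed entries
theorem pv_loop (items : List (String × Int)) (out r : List (String × Int))
    (h : (items.map Prod.fst).Nodup) :
    (items.foldl esStep (out, PySem.Dict.mk r)).1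
      ++ (items.foldl esStep (out, PySem.Dict.mk r)).2.items
    = out ++ items.filter (fun kv => decide (kv.1 ∈ r.map Prod.fst))
          ++ r.filter (fun kv => decide (kv.1 ∉ items.map Prod.fst)) := by
  induction items generalizing out r with
  | nil => simp
  | cons kv rest ih =>
    obtain ⟨k, v⟩ := kv
    simp only [List.map_cons, List.nodup_cons] at h
    by_cases hk : k ∈ r.map Prod.fst
    · have hcon : (PySem.Dict.mk r).contains k = true := by
        rw [pv_contains_mk]; simpa using hk
      have hstep : esStep (out, PySem.Dict.mk r) (k, v)
          = (out ++ [(k, v)], PySem.Dict.mk (r.filter (fun p => !(p.1 == k)))) := by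
        simp [esStep, hcon, PySem.Dict.erase]
      rw [List.foldl_cons, hstep, ih _ _ h.2]
      have h1 : rest.filter (fun kv => decide (kv.1 ∈ (r.filter (fun p => !(p.1 == k))).map Prod.fst))
          = rest.filter (fun kv => decide (kv.1 ∈ r.map Prod.fst)) := by
        apply List.filter_congr
        intro p hp
        have hne : p.1 ≠ k := fun he => h.1 (he ▸ List.mem_map_of_mem hp)
        simp only [decide_eq_decide, List.mem_map, List.mem_filter, Bool.not_eq_eq_eq_not,
          Bool.not_true, beq_eq_false_iff_ne]
        constructor
        · rintro ⟨b, ⟨hb, -⟩, he⟩; exact ⟨b, hb, he⟩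
        · rintro ⟨b, hb, he⟩; exact ⟨b, ⟨hb, by rw [he]; exact hne⟩, he⟩
      have h2 : (r.filter (fun p => !(p.1 == k))).filter
            (fun kv => decide (kv.1 ∉ rest.map Prod.fst))
          = r.filter (fun kv => decide (kv.1 ∉ ((k, v) :: rest).map Prod.fst)) := by
        rw [List.filter_filter]
        apply List.filter_congr
        intro p _
        by_cases hpk : p.1 = k
        · simp [hpk]
        · simp [hpk, Bool.and_comm]
      rw [h1, h2]
      simp [hk]
    · have hcon : (PySem.Dict.mk r).contains k = false := by
        rw [pv_contains_mk]; simpa using hk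
      have hstep : esStep (out, PySem.Dict.mk r) (k, v) = (out, PySem.Dict.mk r) := by
        simp [esStep, hcon]
      rw [List.foldl_cons, hstep, ih _ _ h.2]
      have h2 : r.filter (fun kv => decide (kv.1 ∉ rest.map Prod.fst))
          = r.filter (fun kv => decide (kv.1 ∉ ((k, v) :: rest).map Prod.fst)) := by
        apply List.filter_congr
        intro p hp
        have hpk : p.1 ≠ k := fun he => hk (he ▸ List.mem_map_of_mem hp)
        simp [hpk]
      rw [h2]
      simp [hk]

-- ===== VERDICT (by name: the statement is the Claim_ definition above) =====
theorem ensure_state_spec : Claim_equal_ensure_state := by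
  intro state defaults _ hpre
  obtain ⟨hs, hd⟩ := hpre
  unfold Spec_ensure_state ensure_state ensure_state_alt
  dsimp only
  set s := state.getD [] with hsdef
  set skeys := s.map Prod.fst with hskeys
  set dsk := defaults.map Prod.fst with hdsk
  -- A side
  have h0 : (PySem.Dict.ofList s).items = s := pv_items_ofList hs
  have h0' : PySem.Dict.ofList s = PySem.Dict.mk s := by
    cases hmk : PySem.Dict.ofList s
    simpa [hmk] using h0
  have h1 : (defaults.foldl (fun m kv => m.setdefault kv.1 kv.2) (PySem.Dict.ofList s)).items
      = s ++ defaults.filter (fun kv => decide (kv.1 ∉ skeys)) := by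
    rw [pv_setdefault_fold defaults _ hd, h0, h0']
    congr 1
    apply List.filter_congr
    intro kv _
    rw [pv_contains_mk]
    by_cases hmem : kv.1 ∈ skeys
    · simp [hskeys]
    · simp [hskeys]
  set m1 := defaults.foldl (fun m kv => m.setdefault kv.1 kv.2) (PySem.Dict.ofList s) with hm1
  rw [pv_erase_fold dsk m1.keys m1]
  have hA : m1.items.filter (fun p => decide (p.1 ∈ dsk ∨ p.1 ∉ m1.keys))
      = s.filter (fun kv => decide (kv.1 ∈ dsk)) ++ defaults.filter (fun kv => decide (kv.1 ∉ skeys)) := by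
    have hstep : m1.items.filter (fun p => decide (p.1 ∈ dsk ∨ p.1 ∉ m1.keys))
        = m1.items.filter (fun p => decide (p.1 ∈ dsk)) := by
      apply List.filter_congr
      intro p hp
      have hpk : p.1 ∈ m1.keys := by
        simp only [PySem.Dict.keys]
        exact List.mem_map_of_mem hp
      by_cases hmem : p.1 ∈ dsk <;> simp [hmem, hpk]
    rw [hstep, h1, List.filter_append]
    congr 1
    rw [List.filter_filter]
    apply List.filter_congr
    intro kv hkv
    have hin : kv.1 ∈ dsk := List.mem_map_of_mem hkv
    simp [hin]
  rw [hA]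
  -- B side
  have hdmk : PySem.Dict.ofList defaults = PySem.Dict.mk defaults := by
    cases hmk : PySem.Dict.ofList defaults
    simpa [hmk] using pv_items_ofList hd
  rw [hdmk, pv_loop s [] defaults hs]
  have hnodup : ((s.filter (fun kv => decide (kv.1 ∈ dsk))
      ++ defaults.filter (fun kv => decide (kv.1 ∉ skeys))).map Prod.fst).Nodup := by
    rw [List.map_append]
    refine List.Nodup.append ?_ ?_ ?_
    · exact ((List.filter_sublist (l := s)).map Prod.fst).nodup hs
    · exact ((List.filter_sublist (l := defaults)).map Prod.fst).nodup hd
    · intro x hx1 hx2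
      rcases List.mem_map.mp hx1 with ⟨p, hp, hpe⟩
      rcases List.mem_map.mp hx2 with ⟨q, hq, hqe⟩
      have hpin : p.1 ∈ skeys := List.mem_map_of_mem (List.mem_of_mem_filter hp)
      have hqout : q.1 ∉ skeys := by simpa using List.of_mem_filter hq
      exact hqout (hqe ▸ hpe ▸ hpin)
  rw [List.nil_append, pv_items_ofList hnodup]
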